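-- pv_equiv track=rewrite | github.com/kevinyang372/algorithm-studies | leetcode/vowel_consonants.py | solution
-- ===== SOURCE A (Python) =====
-- import collections
--
-- def solution(S):
--
--     vowels = {'A', 'E', 'I', 'O', 'U'}
--
--     def traverse(is_vowel, pool):
--         if not pool['vowels'] and not pool['consonants']:
--             return 1
--
--         count = 0
--         if is_vowel:
--             if not pool['consonants']: return 0
--
--             to_visit = list(pool['consonants'].keys())
--             for char in to_visit:
--                 pool['consonants'][char] -= 1
--                 if pool['consonants'][char] == 0:
--                     pool['consonants'].pop(char)
--                 count += traverse(not is_vowel, pool)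
--                 pool['consonants'][char] += 1
--         else:
--             if not pool['vowels']: return 0
--
--             to_visit = list(pool['vowels'].keys())
--             for char in to_visit:
--                 pool['vowels'][char] -= 1
--                 if pool['vowels'][char] == 0:
--                     pool['vowels'].pop(char)
--                 count += traverse(not is_vowel, pool)
--                 pool['vowels'][char] += 1
--
--         return count
--
--     temp = {}
--     temp['vowels'] = collections.Counter(list(filter(lambda x: x in vowels, S)))
--     temp['consonants'] = collections.Counter(list(filter(lambda x: x not in vowels, S)))
--
--     return traverse(True, temp)
-- ===== SOURCE B (Python) =====
-- import collections
--
-- def solution(S):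
--     vowels = {'A', 'E', 'I', 'O', 'U'}
--     cnt = collections.Counter(S)
--     nv = sum(v for k, v in cnt.items() if k in vowels)
--     nc = len(S) - nv
--     if nc != nv and nc != nv + 1:
--         return 0
--
--     def fact(n):
--         r = 1
--         for i in range(2, n + 1):
--             r *= i
--         return r
--
--     res = fact(nv) * fact(nc)
--     for v in cnt.values():
--         res //= fact(v)
--     return res
-- ===== Notes on version B (the rewrite author's own statement) =====
-- stated objective: faster
-- what changed: Replaces A's exhaustive backtracking over all alternating arrangements (two per-character filter passes plus recursive enumeration) by one Counter over the string and the closed-form multinomial count fact(nv)*fact(nc)//prod(fact(multiplicities)) when nc == nv or nc == nv+1, else 0.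
import Mathlib
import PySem

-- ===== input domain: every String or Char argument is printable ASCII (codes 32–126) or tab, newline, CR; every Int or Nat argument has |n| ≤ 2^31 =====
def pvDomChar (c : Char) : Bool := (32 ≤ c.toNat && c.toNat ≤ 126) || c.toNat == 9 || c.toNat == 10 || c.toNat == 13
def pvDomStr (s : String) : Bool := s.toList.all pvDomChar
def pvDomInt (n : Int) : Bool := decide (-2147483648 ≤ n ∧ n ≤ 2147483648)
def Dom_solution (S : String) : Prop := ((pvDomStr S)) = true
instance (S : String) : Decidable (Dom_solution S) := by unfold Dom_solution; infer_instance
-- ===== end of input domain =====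

-- B replaces A's exponential backtracking over all alternating arrangements by the closed-form
-- multinomial count (factorials divided by multiplicity factorials); equivalence of return values is proved.

-- ===== PORT A =====
-- A's vowel set {'A','E','I','O','U'}
def pvVowels : List Char := ['A', 'E', 'I', 'O', 'U']

-- A's recursive `traverse(is_vowel, pool)`; the pool dict {'vowels': Counter, 'consonants': Counter}
-- is passed as the two counters dv, dc.  The Nat argument is fuel (a totality guard only:
-- each recursive call consumes one character, so fuel = len(S)+1 is never exhausted).
def pvTraverse : Nat → Bool → PySem.Dict Char Int → PySem.Dict Char Int → Int
  | 0, _, _, _ => 0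
  | fuel+1, isV, dv, dc =>
    if dv.items = [] ∧ dc.items = [] then 1
    else if isV then
      if dc.items = [] then 0
      else
        -- to_visit = list(pool['consonants'].keys()); the loop body mutates and restores the counter
        (dc.keys.foldl (fun (st : Int × PySem.Dict Char Int) ch =>
          let d1 := st.2.modify ch 0 (· - 1)
          let d2 := if d1.getD ch 0 = 0 then d1.erase ch else d1
          (st.1 + pvTraverse fuel (!isV) dv d2, d2.modify ch 0 (· + 1))) (0, dc)).1
    else
      if dv.items = [] then 0
      else
        (dv.keys.foldl (fun (st : Int × PySem.Dict Char Int) ch =>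
          let d1 := st.2.modify ch 0 (· - 1)
          let d2 := if d1.getD ch 0 = 0 then d1.erase ch else d1
          (st.1 + pvTraverse fuel (!isV) d2 dc, d2.modify ch 0 (· + 1))) (0, dv)).1

def solution (S : String) : Int :=
  let dv := PySem.Dict.counter (S.toList.filter (fun x => pvVowels.contains x))
  let dc := PySem.Dict.counter (S.toList.filter (fun x => !pvVowels.contains x))
  pvTraverse (S.toList.length + 1) true dv dc

-- ===== PORT B =====
-- Source B's fact(n): r = 1; for i in range(2, n+1): r *= i
def pvFact (n : Int) : Int := (PySem.List.pyRange 2 (n + 1) 1).foldl (fun r i => r * i) 1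

def solution_alt (S : String) : Int :=
  -- one Counter over the whole string, then the closed-form multinomial
  let cnt := PySem.Dict.counter S.toList
  let nv := ((cnt.items.filter (fun p => ['A', 'E', 'I', 'O', 'U'].contains p.1)).map
      (fun p => p.2)).sum
  let nc := PySem.Str.len S - nv
  if nc ≠ nv ∧ nc ≠ nv + 1 then 0
  else
    let res := pvFact nv * pvFact nc
    cnt.values.foldl (fun r v => PySem.Int.floordiv r (pvFact v)) res

-- ===== PRECONDITION & SPEC =====
def Spec_solution (S : String) (out : Int) : Prop := out = solution_alt S
instance (S : String) (out : Int) : Decidable (Spec_solution S out) := by unfold Spec_solution; infer_instance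

-- ===== CLAIM (what is proved, stated in full; the proofs are below) =====
def Claim_equal_solution : Prop := ∀ (S : String), Dom_solution S → Spec_solution S (solution S)

-- ===== LEMMAS AND PROOFS =====

-- The multiset of letters held by a counter dict.
def pvMultOf (l : List (Char × Int)) : Multiset Char :=
  (l.map (fun p => Multiset.replicate p.2.toNat p.1)).sum

def pvDmult (d : PySem.Dict Char Int) : Multiset Char := pvMultOf d.items

-- well-formed counter: distinct keys, all multiplicities ≥ 1
def pvWf (d : PySem.Dict Char Int) : Prop := d.keys.Nodup ∧ ∀ p ∈ d.items, 1 ≤ p.2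

-- multiset-permutation count
def pvP (m : Multiset Char) : ℕ := Nat.multinomial m.toFinset m.count

-- mathematical model of A's traverse
def pvT (b : Bool) (mv mc : Multiset Char) : ℕ :=
  if b then
    if mv = 0 ∧ mc = 0 then 1
    else ∑ c ∈ mc.toFinset.attach, pvT false mv (mc.erase c.1)
  else
    if mv = 0 ∧ mc = 0 then 1
    else ∑ c ∈ mv.toFinset.attach, pvT true (mv.erase c.1) mc
termination_by (mv.card + mc.card)
decreasing_by
· have hc := Multiset.mem_toFinset.mp c.2
  have h1 := Multiset.card_erase_of_mem hc
  rw [Nat.pred_eq_sub_one] at h1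
  have h2 : 0 < mc.card := Multiset.card_pos_iff_exists_mem.mpr ⟨c.1, hc⟩
  omega
· have hc := Multiset.mem_toFinset.mp c.2
  have h1 := Multiset.card_erase_of_mem hc
  rw [Nat.pred_eq_sub_one] at h1
  have h2 : 0 < mv.card := Multiset.card_pos_iff_exists_mem.mpr ⟨c.1, hc⟩
  omega

lemma pvT_true (mv mc : Multiset Char) :
    pvT true mv mc = if mv = 0 ∧ mc = 0 then 1 else ∑ c ∈ mc.toFinset, pvT false mv (mc.erase c) := by
  rw [pvT]
  by_cases h : mv = 0 ∧ mc = 0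
  · simp [h]
  · simp only [if_neg h]; exact Finset.sum_attach _ (fun c => pvT false mv (mc.erase c))

lemma pvT_false (mv mc : Multiset Char) :
    pvT false mv mc = if mv = 0 ∧ mc = 0 then 1 else ∑ c ∈ mv.toFinset, pvT true (mv.erase c) mc := by
  rw [pvT]
  by_cases h : mv = 0 ∧ mc = 0
  · simp [h]
  · simp only [if_neg h]; exact Finset.sum_attach _ (fun c => pvT true (mv.erase c) mc)

lemma pvP_zero : pvP 0 = 1 := by simp [pvP]

lemma pvP_spec (m : Multiset Char) :
    (∏ c ∈ m.toFinset, (m.count c).factorial) * pvP m = (m.card).factorial := by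
  have h := Nat.multinomial_spec m.toFinset m.count
  rw [Multiset.toFinset_sum_count_eq] at h
  exact h

lemma pvK_pos (m : Multiset Char) : 0 < ∏ c ∈ m.toFinset, (m.count c).factorial :=
  Finset.prod_pos (fun _ _ => Nat.factorial_pos _)

-- per-letter step: K · P(m \ {c}) = count c · (card m − 1)!
lemma pvP_erase_term (m : Multiset Char) (c : Char) (hc : c ∈ m.toFinset) :
    (∏ x ∈ m.toFinset, (m.count x).factorial) * pvP (m.erase c)
      = m.count c * (m.card - 1).factorial := by
  have hcm : c ∈ m := Multiset.mem_toFinset.mp hc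
  have hcount : 1 ≤ m.count c := Multiset.count_pos.mpr hcm
  have hsub : (m.erase c).toFinset ⊆ m.toFinset := by
    intro x hx
    exact Multiset.mem_toFinset.mpr (Multiset.mem_of_mem_erase (Multiset.mem_toFinset.mp hx))
  have hprod_ext : ∏ x ∈ m.toFinset, ((m.erase c).count x).factorial
      = ∏ x ∈ (m.erase c).toFinset, ((m.erase c).count x).factorial := by
    symm
    apply Finset.prod_subset hsub
    intro x _ hx
    rw [Multiset.count_eq_zero.mpr (fun hmem => hx (Multiset.mem_toFinset.mpr hmem))]
    rfl
  have hK : ∏ x ∈ m.toFinset, (m.count x).factorial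
      = m.count c * ∏ x ∈ m.toFinset, ((m.erase c).count x).factorial := by
    rw [← Finset.mul_prod_erase _ _ hc, ← Finset.mul_prod_erase _ _ hc]
    have h1 : ∏ x ∈ m.toFinset.erase c, (m.count x).factorial
        = ∏ x ∈ m.toFinset.erase c, ((m.erase c).count x).factorial := by
      apply Finset.prod_congr rfl
      intro x hx
      rw [Multiset.count_erase_of_ne (Finset.ne_of_mem_erase hx)]
    rw [h1, Multiset.count_erase_self]
    obtain ⟨k, hk⟩ : ∃ k, m.count c = k + 1 := ⟨m.count c - 1, by omega⟩
    rw [hk, Nat.add_sub_cancel, Nat.factorial_succ]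
    ring
  have hspecE := pvP_spec (m.erase c)
  rw [← hprod_ext] at hspecE
  have hcard : (m.erase c).card = m.card - 1 := by
    rw [Multiset.card_erase_of_mem hcm, Nat.pred_eq_sub_one]
  rw [hcard] at hspecE
  calc (∏ x ∈ m.toFinset, (m.count x).factorial) * pvP (m.erase c)
      = m.count c * ((∏ x ∈ m.toFinset, ((m.erase c).count x).factorial) * pvP (m.erase c)) := by
        rw [hK]; ring
    _ = m.count c * (m.card - 1).factorial := by rw [hspecE]

-- the key combinatorial identity: removing one occurrence of each support letter and summing
lemma pvP_sum_erase (m : Multiset Char) (hm : m ≠ 0) :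
    ∑ c ∈ m.toFinset, pvP (m.erase c) = pvP m := by
  have hn : 1 ≤ m.card := by
    rw [Nat.one_le_iff_ne_zero]
    exact fun h0 => hm (Multiset.card_eq_zero.mp h0)
  apply Nat.eq_of_mul_eq_mul_left (pvK_pos m)
  rw [Finset.mul_sum]
  calc ∑ c ∈ m.toFinset, (∏ x ∈ m.toFinset, (m.count x).factorial) * pvP (m.erase c)
      = ∑ c ∈ m.toFinset, m.count c * (m.card - 1).factorial := by
        apply Finset.sum_congr rfl
        intro c hc
        exact pvP_erase_term m c hc
    _ = (∑ c ∈ m.toFinset, m.count c) * (m.card - 1).factorial := by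
        rw [Finset.sum_mul]
    _ = m.card * (m.card - 1).factorial := by rw [Multiset.toFinset_sum_count_eq]
    _ = (m.card).factorial := by
        rw [show m.card = (m.card - 1) + 1 from by omega, Nat.factorial_succ]
        simp
    _ = (∏ x ∈ m.toFinset, (m.count x).factorial) * pvP m := (pvP_spec m).symm

-- closed form of pvT, card-bounded form for the induction
lemma pvT_closed_aux (n : ℕ) : ∀ (b : Bool) (mv mc : Multiset Char), mv.card + mc.card ≤ n →
    pvT b mv mc =
      if (if b then mc.card = mv.card ∨ mc.card = mv.card + 1
          else mv.card = mc.card ∨ mv.card = mc.card + 1)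
      then pvP mv * pvP mc else 0 := by
  induction n with
  | zero =>
    intro b mv mc hle
    have hv : mv = 0 := Multiset.card_eq_zero.mp (by omega)
    have hc : mc = 0 := Multiset.card_eq_zero.mp (by omega)
    subst hv; subst hc
    cases b <;> simp [pvT, pvP_zero]
  | succ n ihn =>
    intro b mv mc hle
    by_cases h0 : mv = 0 ∧ mc = 0
    · obtain ⟨rfl, rfl⟩ := h0
      cases b <;> simp [pvT, pvP_zero]
    · cases b
      · rw [pvT_false, if_neg h0]
        simp only [Bool.false_eq_true, if_false]
        by_cases hmv : mv = 0
        · have hc : mc ≠ 0 := fun h => h0 ⟨hmv, h⟩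
          have hc1 : 1 ≤ mc.card := by
            rw [Nat.one_le_iff_ne_zero]
            exact fun h => hc (Multiset.card_eq_zero.mp h)
          rw [hmv]
          simp only [Multiset.toFinset_zero, Finset.sum_empty, Multiset.card_zero]
          rw [if_neg (by omega)]
        · have hv1 : 1 ≤ mv.card := by
            rw [Nat.one_le_iff_ne_zero]
            exact fun h => hmv (Multiset.card_eq_zero.mp h)
          have hterm : ∀ c ∈ mv.toFinset, pvT true (mv.erase c) mc
              = if (mc.card = mv.card - 1 ∨ mc.card = mv.card) then pvP (mv.erase c) * pvP mc
                else 0 := by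
            intro c hc
            have hcm := Multiset.mem_toFinset.mp hc
            have hcard := Multiset.card_erase_of_mem hcm
            rw [Nat.pred_eq_sub_one] at hcard
            rw [ihn true (mv.erase c) mc (by rw [hcard]; omega), hcard]
            simp only [if_true, Nat.sub_add_cancel hv1]
          rw [Finset.sum_congr rfl hterm]
          by_cases hcond : mv.card = mc.card ∨ mv.card = mc.card + 1
          · rw [if_pos hcond]
            have : (mc.card = mv.card - 1 ∨ mc.card = mv.card) := by omega
            simp only [if_pos this]
            rw [← Finset.sum_mul, pvP_sum_erase mv hmv]
          · rw [if_neg hcond]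
            have : ¬ (mc.card = mv.card - 1 ∨ mc.card = mv.card) := by omega
            simp only [if_neg this, Finset.sum_const_zero]
      · rw [pvT_true, if_neg h0]
        simp only [if_true]
        by_cases hmc : mc = 0
        · have hv : mv ≠ 0 := fun h => h0 ⟨h, hmc⟩
          have hv1 : 1 ≤ mv.card := by
            rw [Nat.one_le_iff_ne_zero]
            exact fun h => hv (Multiset.card_eq_zero.mp h)
          rw [hmc]
          simp only [Multiset.toFinset_zero, Finset.sum_empty, Multiset.card_zero]
          rw [if_neg (by omega)]
        · have hc1 : 1 ≤ mc.card := by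
            rw [Nat.one_le_iff_ne_zero]
            exact fun h => hmc (Multiset.card_eq_zero.mp h)
          have hterm : ∀ c ∈ mc.toFinset, pvT false mv (mc.erase c)
              = if (mv.card = mc.card - 1 ∨ mv.card = mc.card) then pvP mv * pvP (mc.erase c)
                else 0 := by
            intro c hc
            have hcm := Multiset.mem_toFinset.mp hc
            have hcard := Multiset.card_erase_of_mem hcm
            rw [Nat.pred_eq_sub_one] at hcard
            rw [ihn false mv (mc.erase c) (by rw [hcard]; omega), hcard]
            simp only [Bool.false_eq_true, if_false, Nat.sub_add_cancel hc1]
          rw [Finset.sum_congr rfl hterm]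
          by_cases hcond : mc.card = mv.card ∨ mc.card = mv.card + 1
          · rw [if_pos hcond]
            have : (mv.card = mc.card - 1 ∨ mv.card = mc.card) := by omega
            simp only [if_pos this]
            rw [← Finset.mul_sum, pvP_sum_erase mc hmc]
          · rw [if_neg hcond]
            have : ¬ (mv.card = mc.card - 1 ∨ mv.card = mc.card) := by omega
            simp only [if_neg this, Finset.sum_const_zero]

lemma pvT_closed (b : Bool) (mv mc : Multiset Char) :
    pvT b mv mc =
      if (if b then mc.card = mv.card ∨ mc.card = mv.card + 1
          else mv.card = mc.card ∨ mv.card = mc.card + 1)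
      then pvP mv * pvP mc else 0 :=
  pvT_closed_aux (mv.card + mc.card) b mv mc le_rfl

-- ---- counter-dict lemmas ----

lemma pvMultOf_nil : pvMultOf [] = 0 := rfl

lemma pvMultOf_cons (p : Char × Int) (rest : List (Char × Int)) :
    pvMultOf (p :: rest) = Multiset.replicate p.2.toNat p.1 + pvMultOf rest := by
  simp [pvMultOf]

lemma pvMem_multOf {l : List (Char × Int)} {ch : Char} (h : ch ∈ pvMultOf l) :
    ch ∈ l.map (·.1) := by
  induction l with
  | nil => simp [pvMultOf] at h
  | cons p rest ih =>
    rw [pvMultOf_cons, Multiset.mem_add] at h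
    rcases h with h | h
    · simp [Multiset.eq_of_mem_replicate h]
    · simp [ih h]

lemma pvCount_zero {l : List (Char × Int)} {ch : Char} (h : ch ∉ l.map (·.1)) :
    (pvMultOf l).count ch = 0 := by
  rw [Multiset.count_eq_zero]
  exact fun hm => h (pvMem_multOf hm)

lemma pvGetD_mk_cons (k : Char) (u : Int) (rest : List (Char × Int)) (ch : Char) :
    (PySem.Dict.mk ((k, u) :: rest)).getD ch 0 = if k = ch then u else (PySem.Dict.mk rest).getD ch 0 := by
  simp only [PySem.Dict.getD, PySem.Dict.get?_mk_cons, beq_iff_eq]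
  split <;> rfl

lemma pvMultOf_count (l : List (Char × Int)) (hnd : (l.map (·.1)).Nodup) (ch : Char) :
    (pvMultOf l).count ch = ((PySem.Dict.mk l).getD ch 0).toNat := by
  induction l with
  | nil => simp [pvMultOf, PySem.Dict.getD, PySem.Dict.get?]
  | cons p rest ih =>
    obtain ⟨k, u⟩ := p
    simp only [List.map_cons, List.nodup_cons] at hnd
    rw [pvMultOf_cons, pvGetD_mk_cons, Multiset.count_add, Multiset.count_replicate]
    by_cases hk : k = ch
    · subst hk
      rw [pvCount_zero hnd.1]
      simp
    · rw [if_neg (show ¬ (k, u).1 = ch from fun h => hk h), if_neg hk, ih hnd.2]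
      simp

lemma pvDmult_count (d : PySem.Dict Char Int) (hnd : d.keys.Nodup) (ch : Char) :
    (pvDmult d).count ch = (d.getD ch 0).toNat := by
  obtain ⟨items⟩ := d
  exact pvMultOf_count items hnd ch

lemma pvDmult_zero_iff (d : PySem.Dict Char Int) (h : pvWf d) :
    pvDmult d = 0 ↔ d.items = [] := by
  constructor
  · intro h0
    cases hd : d.items with
    | nil => rfl
    | cons p rest =>
      exfalso
      have hp : 1 ≤ p.2 := h.2 p (by rw [hd]; exact List.mem_cons_self)
      have : pvMultOf (p :: rest) = 0 := by rw [← hd]; exact h0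
      rw [pvMultOf_cons] at this
      have := eq_zero_of_add_right this
      have hcard := congrArg Multiset.card this
      simp at hcard
      omega
  · intro h0
    unfold pvDmult
    rw [h0, pvMultOf_nil]

lemma pvMem_keys_iff (d : PySem.Dict Char Int) (h : pvWf d) (ch : Char) :
    ch ∈ d.keys ↔ ch ∈ pvDmult d := by
  rw [← Multiset.count_pos, pvDmult_count d h.1]
  constructor
  · intro hk
    obtain ⟨v, hv⟩ := Option.ne_none_iff_exists'.mp
      (fun hn => ((PySem.Dict.get?_eq_none_iff_not_mem_keys d ch).mp hn) hk)
    have hmem := PySem.Dict.mem_items_of_get?_eq_some d hv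
    have h1 : 1 ≤ v := h.2 (ch, v) hmem
    rw [PySem.Dict.getD_of_get?_eq_some d 0 hv]
    omega
  · intro hp
    by_contra hk
    rw [PySem.Dict.getD_of_get?_eq_none d 0 ((PySem.Dict.get?_eq_none_iff_not_mem_keys d ch).mpr hk)] at hp
    simp at hp

lemma pvGetD_nonneg (d : PySem.Dict Char Int) (h : pvWf d) (ch : Char) :
    0 ≤ d.getD ch 0 := by
  cases hv : d.get? ch with
  | none => rw [PySem.Dict.getD_of_get?_eq_none d 0 hv]
  | some v =>
    rw [PySem.Dict.getD_of_get?_eq_some d 0 hv]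
    exact le_trans (by norm_num) (h.2 (ch, v) (PySem.Dict.mem_items_of_get?_eq_some d hv))

lemma pvWf_insert (d : PySem.Dict Char Int) (h : pvWf d) (ch : Char) (w : Int) (hw : 1 ≤ w) :
    pvWf (d.insert ch w) := by
  refine ⟨PySem.Dict.nodup_keys_insert d ch w h.1, ?_⟩
  intro p hp
  rcases ((PySem.Dict.mem_items_insert d _ _ _).mp hp) with hp | hp
  · rw [hp]; exact hw
  · exact h.2 p hp.1

-- increment: d[ch] += 1
lemma pvStep_inc (d : PySem.Dict Char Int) (h : pvWf d) (ch : Char) :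
    pvWf (d.modify ch 0 (· + 1)) ∧ pvDmult (d.modify ch 0 (· + 1)) = ch ::ₘ pvDmult d := by
  have hg := pvGetD_nonneg d h ch
  rw [PySem.Dict.modify]
  have hwf := pvWf_insert d h ch (d.getD ch 0 + 1) (by omega)
  refine ⟨hwf, ?_⟩
  rw [Multiset.ext]
  intro a
  rw [pvDmult_count _ hwf.1, Multiset.count_cons, pvDmult_count d h.1, PySem.Dict.getD_insert]
  by_cases ha : a = ch
  · subst ha; simp; omega
  · simp [ha]

-- dropping all entries at a key whose multiplicity is 0 keeps the multiset
lemma pvMultOf_filter_zero (l : List (Char × Int)) (ch : Char)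
    (h : ∀ p ∈ l, p.1 = ch → p.2.toNat = 0) :
    pvMultOf (l.filter (fun p => !(p.1 == ch))) = pvMultOf l := by
  induction l with
  | nil => rfl
  | cons p rest ih =>
    by_cases hp : p.1 = ch
    · rw [List.filter_cons_of_neg (by simp [hp]), pvMultOf_cons,
        h p List.mem_cons_self hp, ih (fun q hq => h q (List.mem_cons_of_mem _ hq))]
      simp
    · rw [List.filter_cons_of_pos (by simp [hp]), pvMultOf_cons, pvMultOf_cons,
        ih (fun q hq => h q (List.mem_cons_of_mem _ hq))]

lemma pvKeys_erase_sublist (d : PySem.Dict Char Int) (ch : Char) :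
    (d.erase ch).keys.Sublist d.keys := by
  exact List.Sublist.map _ List.filter_sublist

-- decrement and pop when exhausted
lemma pvStep_dec (d : PySem.Dict Char Int) (h : pvWf d) (ch : Char) (hch : 1 ≤ d.getD ch 0) :
    pvWf (if (d.modify ch 0 (· - 1)).getD ch 0 = 0
            then (d.modify ch 0 (· - 1)).erase ch else d.modify ch 0 (· - 1)) ∧
    pvDmult (if (d.modify ch 0 (· - 1)).getD ch 0 = 0
            then (d.modify ch 0 (· - 1)).erase ch else d.modify ch 0 (· - 1)) = (pvDmult d).erase ch := by
  have hmem : ch ∈ pvDmult d := by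
    rw [← Multiset.count_pos, pvDmult_count d h.1]
    omega
  have hd1 : d.modify ch 0 (· - 1) = d.insert ch (d.getD ch 0 - 1) := rfl
  have hnd1 : (d.insert ch (d.getD ch 0 - 1)).keys.Nodup :=
    PySem.Dict.nodup_keys_insert d ch _ h.1
  have hcount1 : ∀ a, (pvDmult (d.insert ch (d.getD ch 0 - 1))).count a
      = if a = ch then (d.getD ch 0 - 1).toNat else (d.getD a 0).toNat := by
    intro a
    rw [pvDmult_count _ hnd1, PySem.Dict.getD_insert]
    by_cases ha : a = ch <;> simp [ha]
  have hget1 : (d.insert ch (d.getD ch 0 - 1)).getD ch 0 = d.getD ch 0 - 1 :=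
    PySem.Dict.getD_insert_self d ch _ 0
  rw [hd1, hget1]
  by_cases hz : d.getD ch 0 - 1 = 0
  · rw [if_pos hz]
    have hval : ∀ p ∈ (d.insert ch (d.getD ch 0 - 1)).items, p.1 ≠ ch → 1 ≤ p.2 := by
      intro p hp hne
      rcases ((PySem.Dict.mem_items_insert d _ _ _).mp hp) with hp | hp
      · exact absurd (by rw [hp]) hne
      · exact h.2 p hp.1
    have hwf2 : pvWf ((d.insert ch (d.getD ch 0 - 1)).erase ch) := by
      refine ⟨(pvKeys_erase_sublist _ ch).nodup hnd1, ?_⟩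
      intro p hp
      rw [PySem.Dict.erase] at hp
      have := List.of_mem_filter hp
      exact hval p (List.mem_of_mem_filter hp) (by simpa using this)
    refine ⟨hwf2, ?_⟩
    have : pvDmult ((d.insert ch (d.getD ch 0 - 1)).erase ch)
        = pvDmult (d.insert ch (d.getD ch 0 - 1)) := by
      unfold pvDmult
      rw [PySem.Dict.erase]
      apply pvMultOf_filter_zero
      intro p hp hpch
      rcases ((PySem.Dict.mem_items_insert d _ _ _).mp hp) with hp | hp
      · rw [hp]; omega
      · exact absurd hpch hp.2
    rw [this, Multiset.ext]
    intro a
    rw [hcount1 a]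
    by_cases ha : a = ch
    · subst ha
      rw [Multiset.count_erase_self, pvDmult_count d h.1]
      simp only [if_true]
      omega
    · rw [Multiset.count_erase_of_ne ha, pvDmult_count d h.1]
      simp [ha]
  · rw [if_neg hz]
    have hwf2 : pvWf (d.insert ch (d.getD ch 0 - 1)) :=
      pvWf_insert d h ch _ (by omega)
    refine ⟨hwf2, ?_⟩
    rw [Multiset.ext]
    intro a
    rw [hcount1 a]
    by_cases ha : a = ch
    · subst ha
      rw [Multiset.count_erase_self, pvDmult_count d h.1]
      simp only [if_true]
      omega
    · rw [Multiset.count_erase_of_ne ha, pvDmult_count d h.1]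
      simp [ha]

lemma pvWf_counter (l : List Char) : pvWf (PySem.Dict.counter l) := by
  refine ⟨PySem.Dict.nodup_keys_counter l, ?_⟩
  intro p hp
  rw [PySem.Dict.items_counter] at hp
  obtain ⟨k, hk, hpk⟩ := List.mem_map.mp hp
  have hkl : k ∈ l := (PySem.Set.mem_ofList l k).mp hk
  have : 1 ≤ l.count k := List.count_pos_iff.mpr hkl
  rw [← hpk]
  show (1 : ℤ) ≤ ((l.count k : ℕ) : ℤ)
  exact_mod_cast this

lemma pvDmult_counter (l : List Char) : pvDmult (PySem.Dict.counter l) = (l : Multiset Char) := by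
  rw [Multiset.ext]
  intro a
  rw [pvDmult_count _ (PySem.Dict.nodup_keys_counter l), PySem.Dict.getD_counter,
    Multiset.coe_count]
  simp

-- ---- A-side: traverse computes pvT ----

lemma pvFold_inv (fuel : Nat) (dv : PySem.Dict Char Int) (mv mc : Multiset Char)
    (hIH : ∀ b dv' dc', pvWf dv' → pvWf dc' → (pvDmult dv').card + (pvDmult dc').card < fuel →
        pvTraverse fuel b dv' dc' = (pvT b (pvDmult dv') (pvDmult dc') : ℤ))
    (hdv : pvWf dv) (hmv : pvDmult dv = mv) (hcard : mv.card + mc.card < fuel + 1) :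
    ∀ (ks : List Char) (cnt : Int) (d : PySem.Dict Char Int), pvWf d → pvDmult d = mc →
      (∀ ch ∈ ks, ch ∈ mc) →
      (ks.foldl (fun (st : Int × PySem.Dict Char Int) ch =>
          let d1 := st.2.modify ch 0 (· - 1)
          let d2 := if d1.getD ch 0 = 0 then d1.erase ch else d1
          (st.1 + pvTraverse fuel false dv d2, d2.modify ch 0 (· + 1))) (cnt, d)).1
        = cnt + ((ks.map (fun ch => (pvT false mv (mc.erase ch) : ℤ))).sum) := by
  intro ks
  induction ks with
  | nil => intro cnt d _ _ _; simp
  | cons ch ks ih =>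
    intro cnt d hwd hd hmem
    have hchm : ch ∈ mc := hmem ch List.mem_cons_self
    have hcount : 1 ≤ d.getD ch 0 := by
      have h1 := pvDmult_count d hwd.1 ch
      rw [hd] at h1
      have h2 := Multiset.count_pos.mpr hchm
      omega
    obtain ⟨hwf2, hm2⟩ := pvStep_dec d hwd ch hcount
    rw [hd] at hm2
    obtain ⟨hwf3, hm3⟩ := pvStep_inc _ hwf2 ch
    rw [hm2, Multiset.cons_erase hchm] at hm3
    have hcd : 0 < mc.card := Multiset.card_pos_iff_exists_mem.mpr ⟨ch, hchm⟩
    have hce := Multiset.card_erase_of_mem hchm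
    rw [Nat.pred_eq_sub_one] at hce
    have htr := hIH false dv _ hdv hwf2 (by rw [hmv, hm2, hce]; omega)
    rw [hmv, hm2] at htr
    rw [List.foldl_cons]
    simp only []
    rw [htr, ih _ _ hwf3 hm3 (fun a ha => hmem a (List.mem_cons_of_mem _ ha)),
      List.map_cons, List.sum_cons]
    ring

lemma pvFold_inv' (fuel : Nat) (dc : PySem.Dict Char Int) (mv mc : Multiset Char)
    (hIH : ∀ b dv' dc', pvWf dv' → pvWf dc' → (pvDmult dv').card + (pvDmult dc').card < fuel →
        pvTraverse fuel b dv' dc' = (pvT b (pvDmult dv') (pvDmult dc') : ℤ))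
    (hdc : pvWf dc) (hmc : pvDmult dc = mc) (hcard : mv.card + mc.card < fuel + 1) :
    ∀ (ks : List Char) (cnt : Int) (d : PySem.Dict Char Int), pvWf d → pvDmult d = mv →
      (∀ ch ∈ ks, ch ∈ mv) →
      (ks.foldl (fun (st : Int × PySem.Dict Char Int) ch =>
          let d1 := st.2.modify ch 0 (· - 1)
          let d2 := if d1.getD ch 0 = 0 then d1.erase ch else d1
          (st.1 + pvTraverse fuel true d2 dc, d2.modify ch 0 (· + 1))) (cnt, d)).1
        = cnt + ((ks.map (fun ch => (pvT true (mv.erase ch) mc : ℤ))).sum) := by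
  intro ks
  induction ks with
  | nil => intro cnt d _ _ _; simp
  | cons ch ks ih =>
    intro cnt d hwd hd hmem
    have hchm : ch ∈ mv := hmem ch List.mem_cons_self
    have hcount : 1 ≤ d.getD ch 0 := by
      have h1 := pvDmult_count d hwd.1 ch
      rw [hd] at h1
      have h2 := Multiset.count_pos.mpr hchm
      omega
    obtain ⟨hwf2, hm2⟩ := pvStep_dec d hwd ch hcount
    rw [hd] at hm2
    obtain ⟨hwf3, hm3⟩ := pvStep_inc _ hwf2 ch
    rw [hm2, Multiset.cons_erase hchm] at hm3
    have hcd : 0 < mv.card := Multiset.card_pos_iff_exists_mem.mpr ⟨ch, hchm⟩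
    have hce := Multiset.card_erase_of_mem hchm
    rw [Nat.pred_eq_sub_one] at hce
    have htr := hIH true _ dc hwf2 hdc (by rw [hmc, hm2, hce]; omega)
    rw [hmc, hm2] at htr
    rw [List.foldl_cons]
    simp only []
    rw [htr, ih _ _ hwf3 hm3 (fun a ha => hmem a (List.mem_cons_of_mem _ ha)),
      List.map_cons, List.sum_cons]
    ring

lemma pvKeys_toFinset (d : PySem.Dict Char Int) (h : pvWf d) :
    d.keys.toFinset = (pvDmult d).toFinset := by
  apply Finset.ext
  intro a
  rw [List.mem_toFinset, Multiset.mem_toFinset]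
  exact pvMem_keys_iff d h a

lemma pvTraverse_eq (fuel : Nat) : ∀ (b : Bool) (dv dc : PySem.Dict Char Int),
    pvWf dv → pvWf dc → (pvDmult dv).card + (pvDmult dc).card < fuel →
    pvTraverse fuel b dv dc = (pvT b (pvDmult dv) (pvDmult dc) : ℤ) := by
  induction fuel with
  | zero => intro b dv dc _ _ hlt; omega
  | succ fuel ihf =>
    intro b dv dc hdv hdc hlt
    cases b
    · simp only [pvTraverse, Bool.not_false]
      by_cases hemp : dv.items = [] ∧ dc.items = []
      · rw [if_pos hemp, (pvDmult_zero_iff dv hdv).mpr hemp.1, (pvDmult_zero_iff dc hdc).mpr hemp.2,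
          pvT_false, if_pos ⟨rfl, rfl⟩]
        rfl
      · rw [if_neg hemp]
        have hmvmc : ¬ (pvDmult dv = 0 ∧ pvDmult dc = 0) := by
          intro hz
          exact hemp ⟨(pvDmult_zero_iff dv hdv).mp hz.1, (pvDmult_zero_iff dc hdc).mp hz.2⟩
        by_cases hv : dv.items = []
        · rw [if_pos hv, pvT_false, if_neg hmvmc, (pvDmult_zero_iff dv hdv).mpr hv]
          simp
        · rw [if_neg hv]
          have hfold := pvFold_inv' fuel dc (pvDmult dv) (pvDmult dc) ihf hdc rfl hlt
            dv.keys 0 dv hdv rfl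
            (fun a ha => (pvMem_keys_iff dv hdv a).mp ha)
          rw [hfold, pvT_false, if_neg hmvmc, zero_add,
            ← List.sum_toFinset _ hdv.1, pvKeys_toFinset dv hdv]
          push_cast
          rfl
    · simp only [pvTraverse, Bool.not_true]
      by_cases hemp : dv.items = [] ∧ dc.items = []
      · rw [if_pos hemp, (pvDmult_zero_iff dv hdv).mpr hemp.1, (pvDmult_zero_iff dc hdc).mpr hemp.2,
          pvT_true, if_pos ⟨rfl, rfl⟩]
        rfl
      · rw [if_neg hemp]
        have hmvmc : ¬ (pvDmult dv = 0 ∧ pvDmult dc = 0) := by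
          intro hz
          exact hemp ⟨(pvDmult_zero_iff dv hdv).mp hz.1, (pvDmult_zero_iff dc hdc).mp hz.2⟩
        by_cases hc : dc.items = []
        · rw [if_pos hc, pvT_true, if_neg hmvmc, (pvDmult_zero_iff dc hdc).mpr hc]
          simp
        · rw [if_neg hc]
          have hfold := pvFold_inv fuel dv (pvDmult dv) (pvDmult dc) ihf hdv rfl hlt
            dc.keys 0 dc hdc rfl
            (fun a ha => (pvMem_keys_iff dc hdc a).mp ha)
          rw [hfold, pvT_true, if_neg hmvmc, zero_add,
            ← List.sum_toFinset _ hdc.1, pvKeys_toFinset dc hdc]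
          push_cast
          rfl

-- ---- B-side arithmetic ----

lemma pvFact_foldl_factorial (m : ℕ) :
    (PySem.List.pyRange 2 ((m : ℤ) + 1) 1).foldl (fun r i => r * i) 1 = (m.factorial : ℤ) := by
  induction m with
  | zero => rfl
  | succ n ih =>
    by_cases hn : n = 0
    · subst hn; rfl
    · have h2 : (2 : ℤ) ≤ (n : ℤ) + 1 := by omega
      rw [show ((n + 1 : ℕ) : ℤ) + 1 = ((n : ℤ) + 1) + 1 by push_cast; ring,
        PySem.List.pyRange_one_succ_right h2, List.foldl_append, ih]
      simp [Nat.factorial_succ]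
      ring

lemma pvFact_natCast (m : ℕ) : pvFact (m : ℤ) = (m.factorial : ℤ) := by
  rw [pvFact]
  exact pvFact_foldl_factorial m

lemma pvMultOf_card (l : List (Char × Int)) (hpos : ∀ p ∈ l, 1 ≤ p.2) :
    ((l.map (·.2)).sum) = ((pvMultOf l).card : ℤ) := by
  induction l with
  | nil => rfl
  | cons p rest ih =>
    have hp := hpos p List.mem_cons_self
    rw [List.map_cons, List.sum_cons, pvMultOf_cons, Multiset.card_add,
      ih (fun q hq => hpos q (List.mem_cons_of_mem _ hq))]
    rw [Multiset.card_replicate]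
    push_cast
    omega

lemma pvProd_fact (l : List (Char × Int)) (hnd : (l.map (·.1)).Nodup)
    (hpos : ∀ p ∈ l, 1 ≤ p.2) :
    ((l.map (·.2)).map (fun k => (k.toNat).factorial)).prod
      = ∏ c ∈ (pvMultOf l).toFinset, ((pvMultOf l).count c).factorial := by
  induction l with
  | nil => simp [pvMultOf]
  | cons p rest ih =>
    obtain ⟨k, u⟩ := p
    simp only [List.map_cons, List.nodup_cons] at hnd ⊢
    have hu : (1 : ℤ) ≤ u := hpos (k, u) List.mem_cons_self
    have hun : u.toNat ≠ 0 := by omega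
    have hknotm : k ∉ pvMultOf rest := fun hm => hnd.1 (pvMem_multOf hm)
    have htf : (pvMultOf ((k, u) :: rest)).toFinset = insert k (pvMultOf rest).toFinset := by
      apply Finset.ext
      intro a
      rw [Multiset.mem_toFinset, pvMultOf_cons, Multiset.mem_add, Finset.mem_insert,
        Multiset.mem_toFinset, Multiset.mem_replicate]
      constructor
      · rintro (⟨-, rfl⟩ | ha) <;> [exact Or.inl rfl; exact Or.inr ha]
      · rintro (rfl | ha) <;> [exact Or.inl ⟨hun, rfl⟩; exact Or.inr ha]
    have hknotf : k ∉ (pvMultOf rest).toFinset := fun hk => hknotm (Multiset.mem_toFinset.mp hk)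
    rw [List.prod_cons, htf, Finset.prod_insert hknotf]
    have hck : (pvMultOf ((k, u) :: rest)).count k = u.toNat := by
      rw [pvMultOf_cons, Multiset.count_add, Multiset.count_replicate, if_pos rfl,
        Multiset.count_eq_zero.mpr hknotm]
      simp
    have hrest : ∏ c ∈ (pvMultOf rest).toFinset, ((pvMultOf ((k, u) :: rest)).count c).factorial
        = ∏ c ∈ (pvMultOf rest).toFinset, ((pvMultOf rest).count c).factorial := by
      apply Finset.prod_congr rfl
      intro c hcf
      have hcne : ¬ c = k := fun hh => hknotf (hh ▸ hcf)
      rw [pvMultOf_cons, Multiset.count_add, Multiset.count_replicate, if_neg (fun hh => hcne hh.symm), zero_add]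
    rw [hck, hrest, ih hnd.2 (fun q hq => hpos q (List.mem_cons_of_mem _ hq))]

lemma pvValues_prod_fact (d : PySem.Dict Char Int) (h : pvWf d) :
    (d.values.map (fun k => (k.toNat).factorial)).prod
      = ∏ c ∈ (pvDmult d).toFinset, ((pvDmult d).count c).factorial := by
  have hv : d.values = d.items.map (·.2) := rfl
  rw [hv]
  exact pvProd_fact d.items h.1 h.2

lemma pvDiv_chain (ks : List Int) (hks : ∀ k ∈ ks, 0 ≤ k) (N : ℕ) :
    ks.foldl (fun r k => PySem.Int.floordiv r (pvFact k)) (N : ℤ)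
      = ((N / (ks.map (fun k => (k.toNat).factorial)).prod : ℕ) : ℤ) := by
  induction ks generalizing N with
  | nil => simp
  | cons k rest ih =>
    have hk := hks k List.mem_cons_self
    rw [List.foldl_cons, show pvFact k = ((k.toNat).factorial : ℤ) by
        rw [← Int.toNat_of_nonneg hk]; exact pvFact_natCast k.toNat,
      PySem.Int.floordiv_natCast N (k.toNat).factorial,
      ih (fun q hq => hks q (List.mem_cons_of_mem _ hq)),
      List.map_cons, List.prod_cons, Nat.div_div_eq_div_mul]

lemma pvFilter_replicate (n : ℕ) (x : Char) (p : Char → Prop) [DecidablePred p] :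
    (Multiset.replicate n x).filter p = if p x then Multiset.replicate n x else 0 := by
  induction n with
  | zero => simp
  | succ n ih =>
    rw [Multiset.replicate_succ, Multiset.filter_cons, ih]
    by_cases hx : p x <;> simp [hx]

-- filtering counter entries by a key predicate filters the letter multiset
lemma pvMultOf_filter_key (l : List (Char × Int)) (q : Char → Bool) :
    pvMultOf (l.filter (fun p => q p.1)) = (pvMultOf l).filter (fun c => q c = true) := by
  induction l with
  | nil => rfl
  | cons p rest ih =>
    rw [pvMultOf_cons, Multiset.filter_add, ← ih, pvFilter_replicate]
    cases hq : q p.1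
    · rw [List.filter_cons_of_neg (by simp [hq])]
      simp
    · rw [List.filter_cons_of_pos (by simp [hq]), pvMultOf_cons]
      simp

lemma pvCounter_filter (xs : List Char) (q : Char → Bool) :
    pvMultOf ((PySem.Dict.counter xs).items.filter (fun p => q p.1)) = ↑(xs.filter q) := by
  rw [pvMultOf_filter_key _ q,
    show pvMultOf (PySem.Dict.counter xs).items = pvDmult (PySem.Dict.counter xs) from rfl,
    pvDmult_counter xs]
  apply Multiset.ext.mpr
  intro a
  rw [Multiset.count_filter, Multiset.coe_count, Multiset.coe_count]
  cases ha : q a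
  · rw [if_neg (by decide : ¬ false = true)]
    symm
    rw [List.count_eq_zero]
    intro hmem
    rw [List.mem_filter, ha] at hmem
    exact Bool.false_ne_true hmem.2
  · rw [if_pos (by decide : true = true), List.count_filter ha]

-- ===== VERDICT (by name: the statement is the Claim_ definition above) =====
lemma pvMain (S : String) : solution S = solution_alt S := by
  have hlen := List.length_eq_length_filter_add (fun x => pvVowels.contains x) (l := S.toList)
  -- abbreviations
  have hwv := pvWf_counter (S.toList.filter (fun x => pvVowels.contains x))
  have hwc := pvWf_counter (S.toList.filter (fun x => !pvVowels.contains x))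
  have hmv := pvDmult_counter (S.toList.filter (fun x => pvVowels.contains x))
  have hmc := pvDmult_counter (S.toList.filter (fun x => !pvVowels.contains x))
  have hcv := Multiset.coe_card (S.toList.filter (fun x => pvVowels.contains x))
  have hcc := Multiset.coe_card (S.toList.filter (fun x => !pvVowels.contains x))
  -- the A side evaluates to the model count
  have hA : solution S
      = (pvT true (↑(S.toList.filter (fun x => pvVowels.contains x)))
               (↑(S.toList.filter (fun x => !pvVowels.contains x))) : ℤ) := by
    show pvTraverse (S.toList.length + 1) true _ _ = _
    rw [pvTraverse_eq _ true _ _ hwv hwc (by rw [hmv, hmc, hcv, hcc]; omega), hmv, hmc]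
  rw [pvT_closed] at hA
  simp only [if_true] at hA
  rw [hcv, hcc] at hA
  -- names for the two counters and the combinatorial quantities
  set lv := S.toList.filter (fun x => pvVowels.contains x) with hlv
  set lc := S.toList.filter (fun x => !pvVowels.contains x) with hlc
  set Pv := pvP (↑lv) with hPv
  set Pc := pvP (↑lc) with hPc
  set Kv := ∏ c ∈ (↑lv : Multiset Char).toFinset, ((↑lv : Multiset Char).count c).factorial with hKv
  set Kc := ∏ c ∈ (↑lc : Multiset Char).toFinset, ((↑lc : Multiset Char).count c).factorial with hKc
  have hKvP : Kv * Pv = (lv.length).factorial := by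
    rw [hKv, hPv, ← hcv]; exact pvP_spec _
  have hKcP : Kc * Pc = (lc.length).factorial := by
    rw [hKc, hPc, ← hcc]; exact pvP_spec _
  -- the B side
  have hB : solution_alt S
      = (if (lc.length : ℤ) ≠ (lv.length : ℤ) ∧ (lc.length : ℤ) ≠ (lv.length : ℤ) + 1 then 0
         else ((lv.length.factorial * lc.length.factorial / (Kv * Kc) : ℕ) : ℤ)) := by
    have hwS := pvWf_counter S.toList
    simp only [solution_alt]
    rw [show (fun (p : Char × Int) => (['A', 'E', 'I', 'O', 'U'].contains p.1))
        = (fun (p : Char × Int) => pvVowels.contains p.1) from rfl]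
    have hfpos : ∀ p ∈ (PySem.Dict.counter S.toList).items.filter
        (fun p => pvVowels.contains p.1), 1 ≤ p.2 :=
      fun p hp => hwS.2 p (List.mem_of_mem_filter hp)
    have hnv := pvMultOf_card _ hfpos
    rw [pvCounter_filter S.toList (fun x => pvVowels.contains x), ← hlv, hcv] at hnv
    rw [hnv]
    have hnc : PySem.Str.len S - ((lv.length : ℕ) : ℤ) = ((lc.length : ℕ) : ℤ) := by
      rw [PySem.Str.len_eq, hlen]
      push_cast
      ring
    rw [hnc]
    by_cases hcnd : (lc.length : ℤ) ≠ (lv.length : ℤ) ∧ (lc.length : ℤ) ≠ (lv.length : ℤ) + 1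
    · rw [if_pos hcnd, if_pos hcnd]
    · rw [if_neg hcnd, if_neg hcnd]
      have hvnn : ∀ k ∈ (PySem.Dict.counter S.toList).values, (0 : ℤ) ≤ k := by
        intro k hk
        obtain ⟨p, hp, hpk⟩ := List.mem_map.mp hk
        have := hwS.2 p hp
        omega
      rw [show pvFact ((lv.length : ℕ) : ℤ) = ((lv.length.factorial : ℕ) : ℤ) from
          pvFact_natCast lv.length,
        show pvFact ((lc.length : ℕ) : ℤ) = ((lc.length.factorial : ℕ) : ℤ) from
          pvFact_natCast lc.length,
        ← Nat.cast_mul, pvDiv_chain _ hvnn _, pvValues_prod_fact _ hwS, pvDmult_counter]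
      -- split the product of multiplicity factorials into vowel and consonant parts
      have h1 : ((↑S.toList : Multiset Char).toFinset.filter (fun c => pvVowels.contains c = true))
          = (↑lv : Multiset Char).toFinset := by
        apply Finset.ext
        intro a
        simp only [Finset.mem_filter, Multiset.mem_toFinset, Multiset.mem_coe, hlv,
          List.mem_filter]
      have h2 : ((↑S.toList : Multiset Char).toFinset.filter
            (fun c => ¬ pvVowels.contains c = true))
          = (↑lc : Multiset Char).toFinset := by
        apply Finset.ext
        intro a
        simp only [Finset.mem_filter, Multiset.mem_toFinset, Multiset.mem_coe, hlc,
          List.mem_filter, Bool.not_eq_true']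
        rw [Bool.not_eq_true]
      have hKsplit : ∏ c ∈ (↑S.toList : Multiset Char).toFinset,
          (Multiset.count c ↑S.toList).factorial = Kv * Kc := by
        rw [← Finset.prod_filter_mul_prod_filter_not ((↑S.toList : Multiset Char).toFinset)
            (fun c => pvVowels.contains c = true) (fun c => (Multiset.count c ↑S.toList).factorial),
          h1, h2, hKv, hKc]
        congr 1
        · apply Finset.prod_congr rfl
          intro c hc
          have hcmem : c ∈ lv := Multiset.mem_coe.mp (Multiset.mem_toFinset.mp hc)
          rw [Multiset.coe_count, Multiset.coe_count, hlv,
            List.count_filter (List.mem_filter.mp (hlv ▸ hcmem)).2]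
        · apply Finset.prod_congr rfl
          intro c hc
          have hcmem : c ∈ lc := Multiset.mem_coe.mp (Multiset.mem_toFinset.mp hc)
          rw [Multiset.coe_count, Multiset.coe_count, hlc,
            List.count_filter (List.mem_filter.mp (hlc ▸ hcmem)).2]
      rw [hKsplit]
  rw [hA, hB]
  have hKvpos : 0 < Kv := by rw [hKv]; exact pvK_pos _
  have hKcpos : 0 < Kc := by rw [hKc]; exact pvK_pos _
  have hdiv : lv.length.factorial * lc.length.factorial / (Kv * Kc) = Pv * Pc := by
    rw [← hKvP, ← hKcP, show Kv * Pv * (Kc * Pc) = Kv * Kc * (Pv * Pc) from by ring,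
      Nat.mul_div_cancel_left _ (Nat.mul_pos hKvpos hKcpos)]
  rw [hdiv]
  by_cases hcnd : lc.length = lv.length ∨ lc.length = lv.length + 1
  · rw [if_pos hcnd, if_neg (by omega)]
  · rw [if_neg hcnd, if_pos (by constructor <;> omega)]
    exact Nat.cast_zero

theorem solution_spec : Claim_equal_solution := by
  unfold Claim_equal_solution
  intro S _
  unfold Spec_solution
  exact pvMain S
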